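-- pv_equiv track=rewrite | github.com/Biolexey/Programing-Contests-Questions | atcoder/ABC/240/247/ABC247E_MaxMin.py | f
-- ===== SOURCE A (Python) =====
-- def f(a):                                   #0が連続してる部分で範囲の組み合わせn_C_2を計算する
--   ans, s = 0, 1
--   for x in a:
--     if x == 1:
--       ans += s * (s - 1) // 2
--       s = 1
--     else:
--       s += 1
--   ans += s * (s - 1) // 2
--   return ans
-- ===== SOURCE B (Python) =====
-- def f(a):
--     # staged: collect delimiter positions (indices of 1s) first, then sum
--     # the triangular count for each gap between consecutive delimiters
--     n = len(a)
--     bounds = [-1] + [i for i, x in enumerate(a) if x == 1] + [n]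
--     ans = 0
--     for p, q in zip(bounds, bounds[1:]):
--         g = q - p - 1
--         ans += g * (g + 1) // 2
--     return ans
-- ===== Notes on version B (the rewrite author's own statement) =====
-- stated objective: alternative
-- what changed: B first builds the list of delimiter positions (indices of 1s, with sentinels -1 and n) and then sums a triangular closed form over consecutive-position gaps, instead of A's single pass that maintains a running counter and folds the triangular term in at each delimiter plus a post-loop tail term.
import Mathlib
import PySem

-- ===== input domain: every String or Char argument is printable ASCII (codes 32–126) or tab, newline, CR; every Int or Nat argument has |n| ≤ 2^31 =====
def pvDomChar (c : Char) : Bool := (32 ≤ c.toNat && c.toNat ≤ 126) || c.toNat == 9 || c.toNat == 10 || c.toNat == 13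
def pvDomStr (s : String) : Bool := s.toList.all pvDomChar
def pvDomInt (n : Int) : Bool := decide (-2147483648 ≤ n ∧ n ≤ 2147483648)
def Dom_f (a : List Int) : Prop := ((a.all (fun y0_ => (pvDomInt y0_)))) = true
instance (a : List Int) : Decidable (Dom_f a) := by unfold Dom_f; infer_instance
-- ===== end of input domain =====

-- B replaces A's running-counter fold by a staged pass: delimiter positions first,
-- then a triangular closed form per gap (objective: alternative decomposition).

-- ===== PORT A =====
-- A: one pass maintaining (ans, s); triangular term folded in at each 1, plus a tail term
def f (a : List Int) : Int :=
  let st := a.foldl (fun (p : Int × Int) x =>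
    if x = 1 then (p.1 + PySem.Int.floordiv (p.2 * (p.2 - 1)) 2, 1)
    else (p.1, p.2 + 1)) (0, 1)
  st.1 + PySem.Int.floordiv (st.2 * (st.2 - 1)) 2

-- ===== PORT B =====
-- B: bounds = [-1] ++ indices of 1s ++ [n]; sum g*(g+1)//2 over consecutive gaps
def f_alt (a : List Int) : Int :=
  let n : Int := a.length
  let bounds : List Int :=
    [-1] ++ ((PySem.List.enumerate a).filter (fun p => p.2 = 1)).map (fun p => p.1) ++ [n]
  (bounds.zip (bounds.drop 1)).foldl (fun ans pq =>
    let g := pq.2 - pq.1 - 1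
    ans + PySem.Int.floordiv (g * (g + 1)) 2) 0

-- ===== PRECONDITION & SPEC =====
def Spec_f (a : List Int) (out : Int) : Prop := out = f_alt a
instance (a : List Int) (out : Int) : Decidable (Spec_f a out) := by unfold Spec_f; infer_instance

-- ===== CLAIM (what is proved, stated in full; the proofs are below) =====
def Claim_equal_f : Prop := ∀ (a : List Int), Dom_f a → Spec_f a (f a)

-- ===== LEMMAS AND PROOFS =====

-- common reference function: G a k = answer for a given that the current run already has length k
def pvG : List Int → Int → Int
  | [], k => PySem.Int.floordiv (k * (k + 1)) 2
  | x :: t, k =>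
    if x = 1 then PySem.Int.floordiv (k * (k + 1)) 2 + pvG t 0 else pvG t (k + 1)

-- pairwise gap sum along a list of positions, given the previous position
def pvPairsSum (prev : Int) : List Int → Int
  | [] => 0
  | q :: r => PySem.Int.floordiv ((q - prev - 1) * (q - prev - 1 + 1)) 2 + pvPairsSum q r

-- indices (as Int, starting at i) of the elements equal to 1
def pvOnes (i : Int) : List Int → List Int
  | [] => []
  | x :: t => if x = 1 then i :: pvOnes (i + 1) t else pvOnes (i + 1) t

theorem pvOnes_eq (a : List Int) (i : Int) :
    ((PySem.List.enumerate a i).filter (fun p => p.2 = 1)).map (fun p => p.1) = pvOnes i a := by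
  induction a generalizing i with
  | nil => simp [PySem.List.enumerate_nil, pvOnes]
  | cons x t ih =>
    by_cases hx : x = 1 <;>
      simp [PySem.List.enumerate_cons, hx, pvOnes, ih]

theorem pvZipFoldl (l : List Int) (prev acc : Int) :
    ((prev :: l).zip l).foldl (fun ans pq =>
      let g := pq.2 - pq.1 - 1
      ans + PySem.Int.floordiv (g * (g + 1)) 2) acc = acc + pvPairsSum prev l := by
  induction l generalizing prev acc with
  | nil => simp [pvPairsSum]
  | cons q r ih =>
    rw [List.zip_cons_cons, List.foldl_cons, ih q]
    simp only [pvPairsSum]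
    ring_nf

theorem pvPairs_eq_G (a : List Int) (i prev : Int) :
    pvPairsSum prev (pvOnes i a ++ [i + a.length]) = pvG a (i - prev - 1) := by
  induction a generalizing i prev with
  | nil => simp [pvOnes, pvPairsSum, pvG]
  | cons x t ih =>
    by_cases hx : x = 1
    · have h2 := ih (i + 1) i
      rw [show i + 1 - i - 1 = (0 : Int) by ring] at h2
      subst hx
      simp only [pvOnes, pvG, List.length_cons]
      push_cast
      rw [show i + ((t.length : Int) + 1) = i + 1 + t.length by ring]
      have hunf : pvPairsSum prev (i :: (pvOnes (i + 1) t ++ [i + 1 + (t.length : Int)])) =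
          PySem.Int.floordiv ((i - prev - 1) * (i - prev - 1 + 1)) 2 +
          pvPairsSum i (pvOnes (i + 1) t ++ [i + 1 + (t.length : Int)]) := rfl
      rw [List.cons_append, hunf, h2]
    · have h2 := ih (i + 1) prev
      simp only [pvOnes, if_neg hx, pvG, List.length_cons]
      push_cast
      rw [show i + (((t.length : Int)) + 1) = i + 1 + t.length by ring, h2,
        show i + 1 - prev - 1 = i - prev - 1 + 1 by ring]

theorem pvA_eq_G (l : List Int) (ans s : Int) :
    (l.foldl (fun (p : Int × Int) x =>
      if x = 1 then (p.1 + PySem.Int.floordiv (p.2 * (p.2 - 1)) 2, 1)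
      else (p.1, p.2 + 1)) (ans, s)).1
    + PySem.Int.floordiv (((l.foldl (fun (p : Int × Int) x =>
      if x = 1 then (p.1 + PySem.Int.floordiv (p.2 * (p.2 - 1)) 2, 1)
      else (p.1, p.2 + 1)) (ans, s)).2) * ((l.foldl (fun (p : Int × Int) x =>
      if x = 1 then (p.1 + PySem.Int.floordiv (p.2 * (p.2 - 1)) 2, 1)
      else (p.1, p.2 + 1)) (ans, s)).2 - 1)) 2
    = ans + pvG l (s - 1) := by
  induction l generalizing ans s with
  | nil =>
    simp only [List.foldl_nil, pvG]
    rw [show s * (s - 1) = (s - 1) * (s - 1 + 1) by ring]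
  | cons x t ih =>
    by_cases hx : x = 1
    · subst hx
      rw [List.foldl_cons, if_pos rfl, ih,
        show pvG (1 :: t) (s - 1) = PySem.Int.floordiv ((s - 1) * (s - 1 + 1)) 2 + pvG t 0
          from by simp [pvG],
        show s * (s - 1) = (s - 1) * (s - 1 + 1) by ring,
        show (1 : Int) - 1 = 0 by ring]
      ring_nf
    · rw [List.foldl_cons, if_neg hx, ih,
        show pvG (x :: t) (s - 1) = pvG t (s - 1 + 1) from by simp [pvG, hx],
        show s + 1 - 1 = s - 1 + 1 by ring]

-- ===== VERDICT (by name: the statement is the Claim_ definition above) =====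
theorem f_spec : Claim_equal_f := by
  intro a _
  unfold Spec_f f f_alt
  rw [show PySem.List.enumerate a = PySem.List.enumerate a 0 from rfl, pvOnes_eq]
  simp only [List.cons_append, List.nil_append, List.drop_one, List.tail_cons]
  rw [pvZipFoldl (pvOnes 0 a ++ [(a.length : Int)]) (-1) 0,
    show ((a.length : Int)) = 0 + a.length by ring, pvPairs_eq_G a 0 (-1),
    pvA_eq_G a 0 1]
  norm_num
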